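-- pv_equiv track=rewrite | github.com/chelseashin/AlgorithmStudy2021 | namsookim/SWEA/4주차/2383(점심식사시간)_2.py | calc
-- ===== SOURCE A (Python) =====
-- def calc(move_person,down_time):
--     wait_people ,cnt = 0,0
--
--     down_people = []
--
--     while move_person or wait_people>=1 or down_people:
--
--         while wait_people:
--             # 기다리는 사람 있으면
--             if len(down_people) ==3:
--                 break
--             # 사람이 3미만이면
--             down_people.append(down_time)
--             wait_people -=1
--
--
--         for i in range(len(down_people)-1,-1,-1):
--             down_people[i] -= 1
--             if down_people[i] == 0:
--                 down_people.pop(i)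
--
--         for i in range(len(move_person)-1,-1,-1):
--             move_person[i] -= 1
--             if move_person[i] == 0:
--                 wait_people +=1
--                 move_person.pop(i)
--
--
--         cnt +=1
--
--     return cnt
-- ===== SOURCE B (Python) =====
-- def calc(move_person, down_time):
--     # Event-over-people rewrite: sort arrivals once and keep absolute finish
--     # minutes, so no per-minute decrement pass over all movers/timers is needed.
--     # NOTE: unlike the original, this does not empty move_person in place;
--     # the equivalence is about the return value.
--     pending = sorted(move_person, reverse=True)  # pop() yields the earliest arrival
--     wait = 0
--     stairs = []  # absolute finish minutes of the <=3 people on the stairs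
--     t = 0
--     while pending or wait or stairs:
--         t += 1
--         board = min(wait, 3 - len(stairs))
--         stairs += [t + down_time - 1] * board
--         wait -= board
--         stairs = [f for f in stairs if f != t]
--         while pending and pending[-1] == t:
--             pending.pop()
--             wait += 1
--     return t
-- ===== Notes on version B (the rewrite author's own statement) =====
-- stated objective: alternative
-- what changed: A rescans and decrements every mover and every stair timer on every simulated minute; B sorts the arrivals once, consumes them from the sorted list as the clock reaches them, and keeps absolute finish minutes for the <=3 people on the stairs, so the per-minute decrement passes disappear.
import Mathlib
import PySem

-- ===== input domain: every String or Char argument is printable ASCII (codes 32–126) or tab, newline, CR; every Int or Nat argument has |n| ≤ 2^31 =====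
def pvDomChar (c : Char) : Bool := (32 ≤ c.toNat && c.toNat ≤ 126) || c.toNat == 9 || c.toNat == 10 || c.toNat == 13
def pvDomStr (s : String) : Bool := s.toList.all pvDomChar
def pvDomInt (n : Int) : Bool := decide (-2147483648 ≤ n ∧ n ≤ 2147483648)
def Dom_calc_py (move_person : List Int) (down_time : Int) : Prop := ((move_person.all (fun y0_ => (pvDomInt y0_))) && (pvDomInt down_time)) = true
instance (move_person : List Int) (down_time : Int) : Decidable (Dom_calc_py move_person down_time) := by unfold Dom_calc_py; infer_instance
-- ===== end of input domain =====

-- B replaces A's per-minute decrement passes over all movers and stair timers by a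
-- sorted arrival list consumed from the front and absolute finish minutes; equivalence
-- is about the return value (Python A empties move_person in place, B does not).

-- ===== PORT A =====
-- Python's inner `while wait_people: if len(down_people)==3: break; append; wait -= 1`:
-- the list never exceeds 3 entries, so the loop runs while wait ≠ 0 ∧ length < 3.
def boardA (d : Int) (wait : Int) (down : List Int) : Int × List Int :=
  if wait ≠ 0 ∧ down.length < 3 then boardA d (wait - 1) (down ++ [d]) else (wait, down)
termination_by 3 - down.length
decreasing_by simp; omega

-- `for i in range(len(down_people)-1,-1,-1): down_people[i] -= 1; pop if 0`:
-- each element is decremented once and zeros are removed, order preserved;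
-- the forward recursion produces that same list.
def decPopA : List Int → List Int
  | [] => []
  | x :: xs => if x - 1 = 0 then decPopA xs else (x - 1) :: decPopA xs

-- the analogous backward pass over move_person, also counting the new waiters
def decMoveA : List Int → List Int × Int
  | [] => ([], 0)
  | x :: xs =>
    let rk := decMoveA xs
    if x - 1 = 0 then (rk.1, rk.2 + 1) else ((x - 1) :: rk.1, rk.2)

-- fuel bound for the outer while-loops of both ports (the simulation of a
-- terminating run takes at most max-arrival + ceil(n/3)+1 descent rounds minutes)
def pvFuel (move_person : List Int) (down_time : Int) : Nat :=
  (move_person.map Int.natAbs).sum + (move_person.length + 1) * (down_time.natAbs + 1) + 1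

def loopA (d : Int) : Nat → List Int → Int → List Int → Int → Int
  | 0, _, _, _, cnt => cnt
  | fuel + 1, mp, wait, down, cnt =>
    if mp ≠ [] ∨ wait ≥ 1 ∨ down ≠ [] then
      let wd := boardA d wait down
      let dn2 := decPopA wd.2
      let mk := decMoveA mp
      loopA d fuel mk.1 (wd.1 + mk.2) dn2 (cnt + 1)
    else cnt

def calc_py (move_person : List Int) (down_time : Int) : Int :=
  loopA down_time (pvFuel move_person down_time) move_person 0 [] 0

-- ===== PORT B =====
-- `while pending and pending[-1] == t: pending.pop(); wait += 1`
-- Source B keeps pending reverse-sorted and pops its last element; that end of the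
-- Python list is the head of the ascending list used here.
def arriveB (t : Int) : List Int → Int → List Int × Int
  | [], w => ([], w)
  | x :: xs, w => if x = t then arriveB t xs (w + 1) else (x :: xs, w)

-- `board = min(wait, 3 - len(stairs)); stairs += [t+down_time-1]*board; wait -= board`
-- (`[x]*board` is the empty list for board < 0, hence `.toNat`); then the filter and arrivals.
def loopB (d : Int) : Nat → List Int → Int → List Int → Int → Int
  | 0, _, _, _, t => t
  | fuel + 1, pending, wait, st, t =>
    if pending ≠ [] ∨ wait ≠ 0 ∨ st ≠ [] then
      let t1 := t + 1
      let board := min wait (3 - (st.length : Int))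
      let st1 := st ++ List.replicate board.toNat (t1 + d - 1)
      let st2 := st1.filter (fun f => f ≠ t1)
      let pw := arriveB t1 pending (wait - board)
      loopB d fuel pw.1 pw.2 st2 t1
    else t

def calc_py_alt (move_person : List Int) (down_time : Int) : Int :=
  loopB down_time (pvFuel move_person down_time)
    (PySem.List.sorted move_person (fun x => x) false) 0 [] 0

-- ===== PRECONDITION & SPEC =====
-- Pre_ excludes exactly the inputs on which Python A never returns: a mover value ≤ 0
-- is decremented past 0 and stays forever, and with any mover present a down_time ≤ 0
-- leaves someone on the stairs forever (both make A's while-loop run unboundedly).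
def Pre_calc_py (move_person : List Int) (down_time : Int) : Prop :=
  (∀ x ∈ move_person, 1 ≤ x) ∧ (move_person = [] ∨ 1 ≤ down_time)
instance (move_person : List Int) (down_time : Int) : Decidable (Pre_calc_py move_person down_time) := by unfold Pre_calc_py; infer_instance
def pvWitness_calc_py : List Int × Int := ([2, 1, 5, 1], 3)

def Spec_calc_py (move_person : List Int) (down_time : Int) (out : Int) : Prop := out = calc_py_alt move_person down_time
instance (move_person : List Int) (down_time : Int) (out : Int) : Decidable (Spec_calc_py move_person down_time out) := by unfold Spec_calc_py; infer_instance

-- ===== CLAIM (what is proved, stated in full; the proofs are below) =====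
def Claim_equal_calc_py : Prop := ∀ (move_person : List Int) (down_time : Int), Dom_calc_py move_person down_time → Pre_calc_py move_person down_time → Spec_calc_py move_person down_time (calc_py move_person down_time)

-- ===== LEMMAS AND PROOFS =====

-- Python A's boarding while-loop in closed form (the stair list never exceeds 3 entries)
theorem boardA_closed (d w : Int) (dn : List Int) (hw : 0 ≤ w) (hdn : dn.length ≤ 3) :
    boardA d w dn = (w - min w (3 - (dn.length : Int)),
      dn ++ List.replicate (min w (3 - (dn.length : Int))).toNat d) := by
  fun_induction boardA d w dn with
  | case1 w dn h ih =>
      rw [ih (by omega) (by simp; omega)]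
      have hk : (min (w - 1) (3 - ((dn ++ [d]).length : Int))).toNat + 1
          = (min w (3 - (dn.length : Int))).toNat := by
        simp only [List.length_append, List.length_cons, List.length_nil]
        push_cast
        omega
      rw [Prod.mk.injEq]
      constructor
      · simp only [List.length_append, List.length_cons, List.length_nil]
        push_cast
        omega
      · rw [List.append_assoc]
        congr 1
        rw [← hk, List.replicate_succ]
        rfl
  | case2 w dn h =>
      have : min w (3 - (dn.length : Int)) = 0 := by
        rcases not_and_or.1 h with h1 | h1
        · have : w = 0 := by omega
          omega
        · have : (3:Int) - dn.length ≤ 0 := by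
            simp at h1; omega
          omega
      simp [this]

theorem decPopA_length (dn : List Int) : (decPopA dn).length ≤ dn.length := by
  induction dn with
  | nil => simp [decPopA]
  | cons x xs ih =>
      simp only [decPopA]
      split
      · simp; omega
      · simp; omega

theorem decPop_map (dn : List Int) (m : Int) :
    (decPopA dn).map (· + (m + 1)) = (dn.map (· + m)).filter (fun f => f ≠ m + 1) := by
  induction dn with
  | nil => rfl
  | cons x xs ih =>
      simp only [decPopA, List.map_cons, List.filter_cons]
      by_cases h : x - 1 = 0
      · have h2 : ¬ (x + m ≠ m + 1) := by omega
        simp [h, h2, ih]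
      · have h2 : (x + m ≠ m + 1) := by omega
        simp [h, h2, ih]
theorem decMove_fst_map (mp : List Int) (m : Int) :
    ((decMoveA mp).1).map (· + (m + 1)) = (mp.map (· + m)).filter (fun x => x ≠ m + 1) := by
  induction mp with
  | nil => rfl
  | cons x xs ih =>
      simp only [decMoveA, List.map_cons, List.filter_cons]
      by_cases h : x - 1 = 0
      · have h2 : ¬ (x + m ≠ m + 1) := by omega
        simp [h, h2, ih]
      · have h2 : (x + m ≠ m + 1) := by omega
        simp [h, h2, ih]
theorem decMove_snd (mp : List Int) : (decMoveA mp).2 = (mp.count 1 : Int) := by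
  induction mp with
  | nil => rfl
  | cons x xs ih =>
      simp only [decMoveA, List.count_cons]
      by_cases h : x - 1 = 0
      · have hx : x = 1 := by omega
        simp [ih, hx]
      · have hx : ¬ (x = 1) := by omega
        simp [h, ih, hx]
theorem decMove_pos (mp : List Int) (h : ∀ x ∈ mp, 1 ≤ x) : ∀ x ∈ (decMoveA mp).1, 1 ≤ x := by
  induction mp with
  | nil => intro x hx; simp [decMoveA] at hx
  | cons y ys ih =>
      intro x hx
      have hy := h y (by simp)
      have hys : ∀ z ∈ ys, 1 ≤ z := fun z hz => h z (by simp [hz])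
      simp only [decMoveA] at hx
      by_cases hc : y - 1 = 0
      · rw [if_pos hc] at hx; exact ih hys x hx
      · rw [if_neg hc] at hx
        rcases List.mem_cons.1 hx with h1 | h1
        · omega
        · exact ih hys x h1
theorem arrive_spec (p : List Int) (m : Int) (hs : List.Pairwise (· ≤ ·) p)
    (hgt : ∀ x ∈ p, m < x) : ∀ w,
    arriveB (m + 1) p w = (p.filter (fun x => x ≠ m + 1), w + (p.count (m + 1) : Int)) := by
  induction p with
  | nil => intro w; simp [arriveB]
  | cons x xs ih =>
      intro w
      simp only [arriveB, List.filter_cons, List.count_cons]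
      by_cases h : x = m + 1
      · rw [if_pos h]
        have hxs : ∀ z ∈ xs, m < z := fun z hz => hgt z (by simp [hz])
        rw [ih hs.tail hxs (w + 1)]
        simp [h]
        omega
      · rw [if_neg h]
        have hx : m + 2 ≤ x := by have := hgt x (by simp); omega
        have hall : ∀ z ∈ xs, z ≠ m + 1 := by
          intro z hz
          have := (List.pairwise_cons.1 hs).1 z hz
          omega
        have hcnt : xs.count (m + 1) = 0 := List.count_eq_zero.2 (by
          intro hmem; exact hall _ hmem rfl)
        have hxne : (x ≠ m + 1) := h
        simp [hxne, hcnt]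
        exact (List.filter_eq_self.2 (by intro z hz; simpa using hall z hz)).symm
theorem count_shift (mp : List Int) (m : Int) :
    ((mp.map (· + m)).count (m + 1)) = mp.count 1 := by
  have h1 : m + 1 = (1 : Int) + m := by omega
  rw [h1]
  exact List.count_map_of_injective mp (· + m) (fun a b h => by dsimp at h; omega) 1

theorem loopAB (d : Int) : ∀ (fuel : Nat) (mp p dn : List Int) (w m : Int),
    (∀ x ∈ mp, 1 ≤ x) → 0 ≤ w → dn.length ≤ 3 → List.Pairwise (· ≤ ·) p →
    (mp.map (· + m)).Perm p → (∀ x ∈ p, m < x) →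
    loopA d fuel mp w dn m = loopB d fuel p w (dn.map (· + m)) m := by
  intro fuel
  induction fuel with
  | zero => intro mp p dn w m _ _ _ _ _ _; rfl
  | succ f ih =>
    intro mp p dn w m h1 hw hdn hs hperm hgt
    have hlen : mp.length = p.length := by
      have := hperm.length_eq; simpa using this
    by_cases hc : mp ≠ [] ∨ w ≥ 1 ∨ dn ≠ []
    · have hc' : p ≠ [] ∨ w ≠ 0 ∨ dn.map (· + m) ≠ [] := by
        rcases hc with h | h | h
        · left; intro hp; apply h; rw [← List.length_eq_zero_iff] at *; omega
        · right; left; omega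
        · right; right; simpa using h
      rw [loopA, loopB, if_pos hc, if_pos hc']
      dsimp only
      have hf : m + 1 + d - 1 = d + m := by ring
      rw [hf]
      simp only [List.length_map]
      have hA := boardA_closed d w dn hw hdn
      rw [hA]
      dsimp only
      have hmap : (dn.map (· + m)) ++
            List.replicate (min w (3 - (dn.length : Int))).toNat (d + m)
          = ((dn ++ List.replicate (min w (3 - (dn.length : Int))).toNat d).map (· + m)) := by
        simp
      rw [hmap, ← decPop_map]
      rw [arrive_spec p m hs hgt]
      have hcnt : ((decMoveA mp).2) = (p.count (m + 1) : Int) := by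
        rw [decMove_snd, ← count_shift mp m, hperm.count_eq]
      rw [← hcnt]
      exact ih (decMoveA mp).1 (p.filter (fun x => x ≠ m + 1))
        (decPopA (dn ++ List.replicate (min w (3 - (dn.length : Int))).toNat d))
        ((w - min w (3 - (dn.length : Int))) + (decMoveA mp).2) (m + 1)
        (decMove_pos mp h1)
        (by have h0 : (0:Int) ≤ (decMoveA mp).2 := by rw [decMove_snd]; positivity
            omega)
        (by have h2 := decPopA_length (dn ++ List.replicate (min w (3 - (dn.length : Int))).toNat d)
            simp only [List.length_append, List.length_replicate] at h2
            omega)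
        (List.Pairwise.sublist (List.filter_sublist) hs)
        (by rw [decMove_fst_map]; exact hperm.filter _)
        (by intro x hx
            have hmem := List.mem_of_mem_filter hx
            have hne := List.of_mem_filter hx
            have := hgt x hmem
            simp at hne
            omega)
    · have hc' : ¬ (p ≠ [] ∨ w ≠ 0 ∨ dn.map (· + m) ≠ []) := by
        push Not at hc ⊢
        refine ⟨?_, by omega, by simp [hc.2.2]⟩
        have := hc.1
        rw [← List.length_eq_zero_iff] at *; omega
      rw [loopA, loopB, if_neg hc, if_neg hc']

-- ===== VERDICT (by name: the statement is the Claim_ definition above) =====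
theorem calc_py_spec : Claim_equal_calc_py := by
  intro mp d _ hpre
  unfold Spec_calc_py calc_py calc_py_alt
  have hperm : (mp.map (· + (0:Int))).Perm (PySem.List.sorted mp (fun x => x) false) := by
    simpa using (PySem.List.sorted_perm mp (fun x => x) false).symm
  have hpair : List.Pairwise (· ≤ ·) (PySem.List.sorted mp (fun x => x) false) :=
    PySem.List.sorted_pairwise mp (fun x => x)
  have hgt : ∀ x ∈ PySem.List.sorted mp (fun x => x) false, (0:Int) < x := by
    intro x hx
    have := hpre.1 x ((PySem.List.mem_sorted mp (fun x => x) false x).1 hx)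
    omega
  have h := loopAB d (pvFuel mp d) mp (PySem.List.sorted mp (fun x => x) false) [] 0 0
    hpre.1 le_rfl (by simp) hpair hperm hgt
  simpa using h
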